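-- pv_equiv track=rewrite | github.com/thynaptic/oricli-alpha | mavaia_core/brain/modules/advanced_reasoning_solvers.py | _apply_translation
-- ===== SOURCE A (Python) =====
-- from typing import Dict, Any, Optional, List, Tuple
--
-- def _apply_translation(grid: List[List[Any]], dx: int, dy: int) -> List[List[Any]]:
--     """
--     Apply translation to grid
--
--     Args:
--         grid: Input grid
--         dx: Horizontal translation
--         dy: Vertical translation
--
--     Returns:
--         Translated grid
--     """
--     import copy
--     height = len(grid)
--     width = len(grid[0]) if height > 0 else 0
--
--     # Create new grid with translated positions
--     result = [[0 for _ in range(width)] for _ in range(height)]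
--
--     for y in range(height):
--         for x in range(width):
--             if grid[y][x] != 0:
--                 new_x = x + dx
--                 new_y = y + dy
--                 if 0 <= new_y < height and 0 <= new_x < width:
--                     result[new_y][new_x] = grid[y][x]
--
--     return result
-- ===== SOURCE B (Python) =====
-- def _apply_translation(grid, dx, dy):
--     height = len(grid)
--     width = len(grid[0]) if height > 0 else 0
--     if dx >= width or -dx >= width or dy >= height or -dy >= height:
--         return [[0] * width for _ in range(height)]
--     if dx >= 0:
--         rows = [[0] * dx + row[:width - dx] for row in grid]
--     else:
--         rows = [row[-dx:width] + [0] * (-dx) for row in grid]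
--     if dy >= 0:
--         return [[0] * width for _ in range(dy)] + rows[:height - dy]
--     return rows[-dy:] + [[0] * width for _ in range(-dy)]
-- ===== Notes on version B (the rewrite author's own statement) =====
-- stated objective: alternative
-- what changed: B replaces A's per-cell scatter loop (test each source cell, write it to its shifted position in a pre-zeroed grid) with whole-block moves: each row is shifted horizontally by concatenating zero padding with a slice, then the row list is shifted vertically the same way; a fully out-of-range shift short-circuits to the zero grid.
-- outside the precondition, e.g. on _apply_translation([[1, 2], [3]], 1, 0): A raises IndexError, B returns [[0, 1], [0, 3]]
import Mathlib
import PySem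

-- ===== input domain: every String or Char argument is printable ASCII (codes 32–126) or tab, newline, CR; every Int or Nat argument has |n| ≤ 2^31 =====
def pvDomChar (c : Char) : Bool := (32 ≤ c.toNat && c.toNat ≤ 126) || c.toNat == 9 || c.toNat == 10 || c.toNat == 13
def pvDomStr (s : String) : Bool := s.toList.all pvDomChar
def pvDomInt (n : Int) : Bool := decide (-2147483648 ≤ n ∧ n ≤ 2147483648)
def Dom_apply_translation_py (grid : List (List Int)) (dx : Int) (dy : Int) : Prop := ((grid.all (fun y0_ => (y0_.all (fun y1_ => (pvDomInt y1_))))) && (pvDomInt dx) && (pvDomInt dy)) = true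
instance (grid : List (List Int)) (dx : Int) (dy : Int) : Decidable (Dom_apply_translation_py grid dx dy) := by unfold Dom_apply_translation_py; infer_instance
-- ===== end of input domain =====

-- B replaces A's per-cell scatter loop with whole-row / whole-grid block moves built from
-- slices and zero padding; same result, different decomposition (no per-cell conditional).

-- ===== PORT A =====
-- scatter: start from an all-zero grid, write each nonzero source cell to its shifted position.
-- grid[y][x] is read via getD; exact on Pre_ (all indices are then in range).
def apply_translation_py (grid : List (List Int)) (dx : Int) (dy : Int) : List (List Int) :=
  let height := grid.length
  let width := if height > 0 then (grid.headD []).length else 0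
  let init := (List.range height).map (fun _ => (List.range width).map (fun _ => (0 : Int)))
  (List.range height).foldl (fun res y =>
    (List.range width).foldl (fun res x =>
      if (grid.getD y []).getD x 0 ≠ 0 then
        let new_x : Int := (x : Int) + dx
        let new_y : Int := (y : Int) + dy
        if 0 ≤ new_y ∧ new_y < (height : Int) ∧ 0 ≤ new_x ∧ new_x < (width : Int) then
          res.set new_y.toNat ((res.getD new_y.toNat []).set new_x.toNat ((grid.getD y []).getD x 0))
        else res
      else res) res) init

-- ===== PORT B =====
-- block moves: if the shift pushes everything out of bounds return the zero grid; otherwise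
-- shift each row horizontally by concatenating zero padding with a slice (row[:width-dx] /
-- row[-dx:width] — in the dx < 0 branch -dx is a positive index, so the slice bounds are
-- nonnegative), then shift the list of rows vertically the same way.
def apply_translation_py_alt (grid : List (List Int)) (dx : Int) (dy : Int) : List (List Int) :=
  let height := grid.length
  let width := if height > 0 then (grid.headD []).length else 0
  if dx ≥ (width : Int) ∨ -dx ≥ (width : Int) ∨ dy ≥ (height : Int) ∨ -dy ≥ (height : Int) then
    (List.range height).map (fun _ => List.replicate width (0 : Int))
  else
    let rows :=
      if dx ≥ 0 then
        grid.map (fun row => List.replicate dx.toNat (0 : Int) ++ PySem.List.slice row none (some ((width : Int) - dx)))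
      else
        grid.map (fun row => PySem.List.slice row (some (-dx)) (some (width : Int)) ++ List.replicate (-dx).toNat (0 : Int))
    if dy ≥ 0 then
      (List.range dy.toNat).map (fun _ => List.replicate width (0 : Int)) ++ PySem.List.slice rows none (some ((height : Int) - dy))
    else
      PySem.List.slice rows (some (-dy)) none ++ (List.range (-dy).toNat).map (fun _ => List.replicate width (0 : Int))

-- ===== PRECONDITION & SPEC =====
-- Pre_ excludes exactly the ragged grids on which the Python A raises IndexError:
-- A reads every cell of the first len(grid[0]) columns, so every row must be at least that long.
def Pre_apply_translation_py (grid : List (List Int)) (_dx : Int) (_dy : Int) : Prop :=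
  ∀ row ∈ grid, (grid.headD []).length ≤ row.length
instance (grid : List (List Int)) (dx : Int) (dy : Int) : Decidable (Pre_apply_translation_py grid dx dy) := by unfold Pre_apply_translation_py; infer_instance
def pvWitness_apply_translation_py : List (List Int) × Int × Int := ([[1, 0], [0, 2]], 1, 1)
def Spec_apply_translation_py (grid : List (List Int)) (dx : Int) (dy : Int) (out : List (List Int)) : Prop := out = apply_translation_py_alt grid dx dy
instance (grid : List (List Int)) (dx : Int) (dy : Int) (out : List (List Int)) : Decidable (Spec_apply_translation_py grid dx dy out) := by unfold Spec_apply_translation_py; infer_instance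

-- ===== CLAIM (what is proved, stated in full; the proofs are below) =====
def Claim_equal_apply_translation_py : Prop := ∀ (grid : List (List Int)) (dx : Int) (dy : Int), Dom_apply_translation_py grid dx dy → Pre_apply_translation_py grid dx dy → Spec_apply_translation_py grid dx dy (apply_translation_py grid dx dy)

-- ===== LEMMAS AND PROOFS =====

def pvMk (h w : Nat) (F : Nat → Nat → Int) : List (List Int) :=
  (List.range h).map (fun y => (List.range w).map (F y))

theorem range_map_set {α : Type} (n a : Nat) (f : Nat → α) (v : α) :
    ((List.range n).map f).set a v
      = (List.range n).map (fun i => if i = a then v else f i) := by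
  apply List.ext_getElem
  · simp
  · intro i h1 h2
    simp at h2
    simp [List.getElem_set]
    by_cases hia : a = i <;> simp [hia]
    · intro hne; omega

theorem range_map_getD {α : Type} (n a : Nat) (f : Nat → α) (d : α) (ha : a < n) :
    ((List.range n).map f).getD a d = f a := by
  rw [List.getD_eq_getElem?_getD]
  simp [ha]

theorem pvMk_congr (h w : Nat) (F G : Nat → Nat → Int)
    (H : ∀ y < h, ∀ x < w, F y x = G y x) : pvMk h w F = pvMk h w G := by
  unfold pvMk
  apply List.map_congr_left
  intro y hy
  apply List.map_congr_left
  intro x hx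
  exact H y (List.mem_range.mp hy) x (List.mem_range.mp hx)

theorem pvMk_set (h w : Nat) (F : Nat → Nat → Int) (a b : Nat) (v : Int)
    (ha : a < h) :
    (pvMk h w F).set a (((pvMk h w F).getD a []).set b v)
      = pvMk h w (fun y x => if y = a ∧ x = b then v else F y x) := by
  unfold pvMk
  rw [range_map_getD h a _ [] ha, range_map_set, range_map_set]
  apply List.map_congr_left
  intro y hy
  by_cases hya : y = a
  · subst hya
    simp only [if_pos rfl]
    apply List.map_congr_left
    intro x hx
    by_cases hxb : x = b <;> simp [hxb]
  · simp [hya]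

theorem pv_inner (grid : List (List Int)) (dx dy : Int) (h w : Nat) (y : Nat)
    (k : Nat) (hk : k ≤ w) (F : Nat → Nat → Int) :
    (List.range k).foldl (fun res x =>
      if (grid.getD y []).getD x 0 ≠ 0 then
        let new_x : Int := (x : Int) + dx
        let new_y : Int := (y : Int) + dy
        if 0 ≤ new_y ∧ new_y < (h : Int) ∧ 0 ≤ new_x ∧ new_x < (w : Int) then
          res.set new_y.toNat ((res.getD new_y.toNat []).set new_x.toNat ((grid.getD y []).getD x 0))
        else res
      else res) (pvMk h w F)
    = pvMk h w (fun ny nx =>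
        if (ny : Int) = (y : Int) + dy ∧ dx ≤ (nx : Int) ∧ (nx : Int) - dx < (k : Int)
            ∧ (grid.getD y []).getD ((nx : Int) - dx).toNat 0 ≠ 0 then
          (grid.getD y []).getD ((nx : Int) - dx).toNat 0
        else F ny nx) := by
  induction k with
  | zero =>
      simp only [List.range_zero, List.foldl_nil]
      apply pvMk_congr
      intro ny hny nx hnx
      rw [if_neg]
      rintro ⟨-, h1, h2, -⟩
      omega
  | succ k ih =>
      rw [List.range_succ, List.foldl_append, ih (by omega), List.foldl_cons, List.foldl_nil]
      by_cases c1 : (grid.getD y []).getD k 0 ≠ 0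
      · simp only [if_pos c1]
        by_cases c2 : 0 ≤ (y : Int) + dy ∧ (y : Int) + dy < (h : Int) ∧ 0 ≤ (k : Int) + dx ∧ (k : Int) + dx < (w : Int)
        · simp only [if_pos c2]
          rw [pvMk_set h w _ ((y : Int) + dy).toNat ((k : Int) + dx).toNat _ (by omega)]
          apply pvMk_congr
          intro ny hny nx hnx
          by_cases ha : ny = ((y : Int) + dy).toNat ∧ nx = ((k : Int) + dx).toNat
          · obtain ⟨ha1, ha2⟩ := ha
            have hnx' : ((nx : Int) - dx).toNat = k := by omega
            rw [if_pos ⟨ha1, ha2⟩, if_pos]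
            · rw [hnx']
            · rw [hnx']
              refine ⟨by omega, by omega, by omega, c1⟩
          · rw [if_neg ha]
            by_cases hb : (ny : Int) = (y : Int) + dy ∧ dx ≤ (nx : Int) ∧ (nx : Int) - dx < (k : Int) ∧ (grid.getD y []).getD ((nx : Int) - dx).toNat 0 ≠ 0
            · rw [if_pos hb, if_pos ⟨hb.1, hb.2.1, by omega, hb.2.2.2⟩]
            · rw [if_neg hb, if_neg]
              rintro ⟨h1, h2, h3, h4⟩
              apply hb
              refine ⟨h1, h2, ?_, h4⟩
              by_cases hx : (nx : Int) - dx = (k : Int)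
              · exfalso; apply ha; constructor <;> omega
              · omega
        · simp only [if_neg c2]
          apply pvMk_congr
          intro ny hny nx hnx
          by_cases hb : (ny : Int) = (y : Int) + dy ∧ dx ≤ (nx : Int) ∧ (nx : Int) - dx < (k : Int) ∧ (grid.getD y []).getD ((nx : Int) - dx).toNat 0 ≠ 0
          · rw [if_pos hb, if_pos ⟨hb.1, hb.2.1, by omega, hb.2.2.2⟩]
          · rw [if_neg hb, if_neg]
            rintro ⟨h1, h2, h3, h4⟩
            apply hb
            refine ⟨h1, h2, ?_, h4⟩
            by_cases hx : (nx : Int) - dx = (k : Int)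
            · exfalso; omega
            · omega
      · simp only [if_neg c1]
        apply pvMk_congr
        intro ny hny nx hnx
        by_cases hb : (ny : Int) = (y : Int) + dy ∧ dx ≤ (nx : Int) ∧ (nx : Int) - dx < (k : Int) ∧ (grid.getD y []).getD ((nx : Int) - dx).toNat 0 ≠ 0
        · rw [if_pos hb, if_pos ⟨hb.1, hb.2.1, by omega, hb.2.2.2⟩]
        · rw [if_neg hb, if_neg]
          rintro ⟨h1, h2, h3, h4⟩
          apply hb
          refine ⟨h1, h2, ?_, h4⟩
          by_cases hx : (nx : Int) - dx = (k : Int)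
          · exfalso
            rw [not_not] at c1
            have : ((nx : Int) - dx).toNat = k := by omega
            rw [this] at h4
            exact h4 c1
          · omega

theorem pv_outer (grid : List (List Int)) (dx dy : Int) (h w : Nat)
    (k : Nat) (hk : k ≤ h) :
    (List.range k).foldl (fun res y =>
      (List.range w).foldl (fun res x =>
        if (grid.getD y []).getD x 0 ≠ 0 then
          let new_x : Int := (x : Int) + dx
          let new_y : Int := (y : Int) + dy
          if 0 ≤ new_y ∧ new_y < (h : Int) ∧ 0 ≤ new_x ∧ new_x < (w : Int) then
            res.set new_y.toNat ((res.getD new_y.toNat []).set new_x.toNat ((grid.getD y []).getD x 0))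
          else res
        else res) res) (pvMk h w (fun _ _ => 0))
    = pvMk h w (fun ny nx =>
        if dy ≤ (ny : Int) ∧ (ny : Int) - dy < (k : Int) ∧ dx ≤ (nx : Int) ∧ (nx : Int) - dx < (w : Int)
            ∧ (grid.getD ((ny : Int) - dy).toNat []).getD ((nx : Int) - dx).toNat 0 ≠ 0 then
          (grid.getD ((ny : Int) - dy).toNat []).getD ((nx : Int) - dx).toNat 0
        else 0) := by
  induction k with
  | zero =>
      simp only [List.range_zero, List.foldl_nil]
      apply pvMk_congr
      intro ny hny nx hnx
      rw [if_neg]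
      rintro ⟨h1, h2, -⟩
      omega
  | succ k ih =>
      rw [List.range_succ, List.foldl_append, ih (by omega), List.foldl_cons, List.foldl_nil]
      rw [pv_inner grid dx dy h w k w le_rfl]
      apply pvMk_congr
      intro ny hny nx hnx
      by_cases hy : (ny : Int) = (k : Int) + dy
      · have e : ((ny : Int) - dy).toNat = k := by omega
        rw [e]
        by_cases hc : dx ≤ (nx : Int) ∧ (nx : Int) - dx < (w : Int) ∧ (grid.getD k []).getD ((nx : Int) - dx).toNat 0 ≠ 0
        · rw [if_pos ⟨hy, hc⟩, if_pos ⟨by omega, by omega, hc.1, hc.2.1, hc.2.2⟩]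
        · rw [if_neg (by rintro ⟨-, hc1, hc2, hc3⟩; exact hc ⟨hc1, hc2, hc3⟩)]
          rw [if_neg (by rintro ⟨h1, h2, hc1, hc2, hc3⟩; exact hc ⟨hc1, hc2, hc3⟩)]
          rw [if_neg (by rintro ⟨h1, h2, hc1, hc2, hc3⟩; exact hc ⟨hc1, hc2, hc3⟩)]
      · rw [if_neg (by rintro ⟨h1, -⟩; exact hy h1)]
        by_cases hb : dy ≤ (ny : Int) ∧ (ny : Int) - dy < (k : Int) ∧ dx ≤ (nx : Int) ∧ (nx : Int) - dx < (w : Int) ∧ (grid.getD ((ny : Int) - dy).toNat []).getD ((nx : Int) - dx).toNat 0 ≠ 0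
        · rw [if_pos hb, if_pos ⟨hb.1, by omega, hb.2.2⟩]
        · rw [if_neg hb, if_neg]
          rintro ⟨h1, h2, h3⟩
          exact hb ⟨h1, by omega, h3⟩

-- B equals the gather closed form on Pre_ (every row at least `width` long)

-- 1-D shift identities: padding ++ slice expressed pointwise over the index range
theorem pv_shift_pos {α : Type} (L : List α) (d : α) (s : Int) (N : Nat)
    (hL : N ≤ L.length) (h0 : 0 ≤ s) (h1 : s < (N : Int)) :
    List.replicate s.toNat d ++ L.take (N - s.toNat)
      = (List.range N).map (fun (i : Nat) =>
          if 0 ≤ (i : Int) - s ∧ (i : Int) - s < (N : Int) then L.getD ((i : Int) - s).toNat d else d) := by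
  apply List.ext_getElem
  · simp
    omega
  · intro i hi1 hi2
    simp only [List.length_map, List.length_range] at hi2
    rw [List.getElem_map, List.getElem_range]
    by_cases hc : i < (List.replicate s.toNat d).length
    · rw [List.getElem_append_left hc]
      simp only [List.length_replicate] at hc
      rw [List.getElem_replicate, if_neg (by omega)]
    · rw [List.getElem_append_right (by omega)]
      simp only [List.length_replicate] at hc ⊢
      rw [List.getElem_take, if_pos (by constructor <;> omega)]
      have he : ((i : Int) - s).toNat = i - s.toNat := by omega
      rw [he, List.getD_eq_getElem L d (by omega)]

theorem pv_shift_neg {α : Type} (L : List α) (d : α) (s : Int) (N : Nat)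
    (hL : N ≤ L.length) (h0 : s < 0) (h1 : -s < (N : Int)) :
    (L.drop (-s).toNat).take (N - (-s).toNat) ++ List.replicate (-s).toNat d
      = (List.range N).map (fun (i : Nat) =>
          if 0 ≤ (i : Int) - s ∧ (i : Int) - s < (N : Int) then L.getD ((i : Int) - s).toNat d else d) := by
  apply List.ext_getElem
  · simp
    omega
  · intro i hi1 hi2
    simp only [List.length_map, List.length_range] at hi2
    rw [List.getElem_map, List.getElem_range]
    by_cases hc : i < ((L.drop (-s).toNat).take (N - (-s).toNat)).length
    · rw [List.getElem_append_left hc]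
      simp only [List.length_take, List.length_drop] at hc
      rw [List.getElem_take, List.getElem_drop, if_pos (by constructor <;> omega)]
      have he : ((i : Int) - s).toNat = (-s).toNat + i := by omega
      rw [he, List.getD_eq_getElem L d (by omega)]
    · rw [List.getElem_append_right (by omega)]
      simp only [List.length_take, List.length_drop] at hc
      rw [List.getElem_replicate, if_neg (by omega)]

theorem pv_alt (grid : List (List Int)) (dx dy : Int)
    (hp : ∀ row ∈ grid, (grid.headD []).length ≤ row.length) :
    apply_translation_py_alt grid dx dy
      = pvMk grid.length (if grid.length > 0 then (grid.headD []).length else 0) (fun ny nx =>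
          if 0 ≤ (ny : Int) - dy ∧ (ny : Int) - dy < (grid.length : Int) ∧ 0 ≤ (nx : Int) - dx
              ∧ (nx : Int) - dx < ((if grid.length > 0 then (grid.headD []).length else 0 : Nat) : Int) then
            (grid.getD ((ny : Int) - dy).toNat []).getD ((nx : Int) - dx).toNat 0
          else 0) := by
  unfold apply_translation_py_alt
  set H := grid.length with hHdef
  set W : Nat := if H > 0 then (grid.headD []).length else 0 with hWdef
  by_cases hc : dx ≥ (W : Int) ∨ -dx ≥ (W : Int) ∨ dy ≥ (H : Int) ∨ -dy ≥ (H : Int)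
  · rw [if_pos hc]
    have : pvMk H W (fun ny nx =>
          if 0 ≤ (ny : Int) - dy ∧ (ny : Int) - dy < (H : Int) ∧ 0 ≤ (nx : Int) - dx
              ∧ (nx : Int) - dx < (W : Int) then
            (grid.getD ((ny : Int) - dy).toNat []).getD ((nx : Int) - dx).toNat 0
          else 0) = pvMk H W (fun _ _ => 0) := by
      apply pvMk_congr
      intro ny hny nx hnx
      rw [if_neg]
      rintro ⟨c1, c2, c3, c4⟩
      omega
    rw [this]
    unfold pvMk
    apply List.map_congr_left
    intro y _
    rw [List.map_const', List.length_range]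
  · rw [if_neg hc]
    rw [not_or, not_or, not_or] at hc
    simp only [not_le] at hc
    obtain ⟨b1, b2, b3, b4⟩ := hc
    have hW0 : 0 < W := by omega
    have hH0 : 0 < H := by omega
    have hWle : ∀ row ∈ grid, W ≤ row.length := by
      intro row hr
      have := hp row hr
      simp only [hWdef, if_pos hH0]
      exact this
    -- the horizontally shifted row list equals a pointwise map, uniformly in the dx sign
    have hrows : (if dx ≥ 0 then
        grid.map (fun row => List.replicate dx.toNat (0 : Int) ++ PySem.List.slice row none (some ((W : Int) - dx)))
      else
        grid.map (fun row => PySem.List.slice row (some (-dx)) (some (W : Int)) ++ List.replicate (-dx).toNat (0 : Int)))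
        = grid.map (fun row => (List.range W).map (fun (nx : Nat) =>
            if 0 ≤ (nx : Int) - dx ∧ (nx : Int) - dx < (W : Int) then row.getD ((nx : Int) - dx).toNat 0 else 0)) := by
      by_cases hdx : dx ≥ 0
      · rw [if_pos hdx]
        apply List.map_congr_left
        intro row hr
        have e1 : (W : Int) - dx = ((W - dx.toNat : Nat) : Int) := by omega
        rw [e1, PySem.List.slice_to_natCast]
        exact pv_shift_pos row 0 dx W (hWle row hr) hdx (by omega)
      · rw [if_neg hdx]
        apply List.map_congr_left
        intro row hr
        rw [PySem.List.slice_toNat row (by omega) (by omega)]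
        have e1 : (W : Int).toNat = W := by omega
        rw [e1]
        exact pv_shift_neg row 0 dx W (hWle row hr) (by omega) (by omega)
    rw [hrows]
    -- now the vertical shift
    set rows := grid.map (fun row => (List.range W).map (fun (nx : Nat) =>
            if 0 ≤ (nx : Int) - dx ∧ (nx : Int) - dx < (W : Int) then row.getD ((nx : Int) - dx).toNat 0 else 0)) with hrdef
    have hlen : rows.length = H := by simp [hrdef, hHdef]
    have hvert : (if dy ≥ 0 then
        (List.range dy.toNat).map (fun _ => List.replicate W (0 : Int)) ++ PySem.List.slice rows none (some ((H : Int) - dy))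
      else
        PySem.List.slice rows (some (-dy)) none ++ (List.range (-dy).toNat).map (fun _ => List.replicate W (0 : Int)))
        = (List.range H).map (fun (ny : Nat) =>
            if 0 ≤ (ny : Int) - dy ∧ (ny : Int) - dy < (H : Int) then rows.getD ((ny : Int) - dy).toNat (List.replicate W 0) else List.replicate W 0) := by
      by_cases hdy : dy ≥ 0
      · rw [if_pos hdy]
        have e1 : (H : Int) - dy = ((H - dy.toNat : Nat) : Int) := by omega
        rw [e1, PySem.List.slice_to_natCast]
        rw [List.map_const', List.length_range]
        exact pv_shift_pos rows (List.replicate W 0) dy H (by omega) hdy (by omega)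
      · rw [if_neg hdy]
        rw [PySem.List.slice_from rows (by omega)]
        rw [List.map_const', List.length_range]
        have e2 : rows.drop (-dy).toNat = (rows.drop (-dy).toNat).take (H - (-dy).toNat) := by
          rw [List.take_of_length_le]
          simp [hlen]
        rw [e2]
        exact pv_shift_neg rows (List.replicate W 0) dy H (by omega) (by omega) (by omega)
    rw [hvert]
    unfold pvMk
    apply List.map_congr_left
    intro ny hny
    have hnyH : ny < H := List.mem_range.mp hny
    by_cases hv : 0 ≤ (ny : Int) - dy ∧ (ny : Int) - dy < (H : Int)
    · rw [if_pos hv]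
      have hsy : ((ny : Int) - dy).toNat < grid.length := by omega
      rw [hrdef, List.getD_eq_getElem _ _ (by simpa using hsy), List.getElem_map]
      apply List.map_congr_left
      intro nx hnx
      beta_reduce
      have hnxW : nx < W := List.mem_range.mp hnx
      by_cases hh : 0 ≤ (nx : Int) - dx ∧ (nx : Int) - dx < (W : Int)
      · rw [if_pos hh, if_pos ⟨hv.1, hv.2, hh.1, hh.2⟩]
        rw [List.getD_eq_getElem grid [] hsy]
      · rw [if_neg hh, if_neg (by rintro ⟨-, -, c3, c4⟩; exact hh ⟨c3, c4⟩)]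
    · rw [if_neg hv]
      have : ∀ nx ∈ List.range W, (if 0 ≤ (ny : Int) - dy ∧ (ny : Int) - dy < (H : Int) ∧ 0 ≤ (nx : Int) - dx
              ∧ (nx : Int) - dx < (W : Int) then
            (grid.getD ((ny : Int) - dy).toNat []).getD ((nx : Int) - dx).toNat 0
          else 0) = (0 : Int) := by
        intro nx _
        rw [if_neg]
        rintro ⟨c1, c2, -⟩
        exact hv ⟨c1, c2⟩
      rw [List.map_congr_left this]
      simp [List.map_const']

theorem pv_main (grid : List (List Int)) (dx dy : Int)
    (hp : ∀ row ∈ grid, (grid.headD []).length ≤ row.length) :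
    apply_translation_py grid dx dy = apply_translation_py_alt grid dx dy := by
  have h1 : apply_translation_py grid dx dy =
      pvMk grid.length (if grid.length > 0 then (grid.headD []).length else 0) (fun ny nx =>
        if dy ≤ (ny : Int) ∧ (ny : Int) - dy < (grid.length : Int) ∧ dx ≤ (nx : Int)
            ∧ (nx : Int) - dx < ((if grid.length > 0 then (grid.headD []).length else 0 : Nat) : Int)
            ∧ (grid.getD ((ny : Int) - dy).toNat []).getD ((nx : Int) - dx).toNat 0 ≠ 0 then
          (grid.getD ((ny : Int) - dy).toNat []).getD ((nx : Int) - dx).toNat 0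
        else 0) :=
    pv_outer grid dx dy grid.length _ grid.length le_rfl
  rw [h1, pv_alt grid dx dy hp]
  apply pvMk_congr
  intro ny hny nx hnx
  by_cases c : 0 ≤ (ny : Int) - dy ∧ (ny : Int) - dy < (grid.length : Int) ∧ 0 ≤ (nx : Int) - dx
      ∧ (nx : Int) - dx < ((if grid.length > 0 then (grid.headD []).length else 0 : Nat) : Int)
  · by_cases cg : (grid.getD ((ny : Int) - dy).toNat []).getD ((nx : Int) - dx).toNat 0 ≠ 0
    · rw [if_pos ⟨by omega, by omega, by omega, by omega, cg⟩, if_pos c]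
    · rw [not_not] at cg
      rw [if_neg (fun hh => (hh.2.2.2.2) cg), if_pos c, cg]
  · rw [if_neg (by rintro ⟨h1', h2', h3', h4', -⟩; exact c ⟨by omega, by omega, by omega, by omega⟩), if_neg c]

-- ===== VERDICT (by name: the statement is the Claim_ definition above) =====
theorem apply_translation_py_spec : Claim_equal_apply_translation_py := by
  intro grid dx dy _ hp
  unfold Spec_apply_translation_py
  exact (pv_main grid dx dy hp).symm ▸ rfl
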